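-- pv_equiv track=rewrite | github.com/haimianying/gesture-recognition-segmentation | HMMSegmentationUnsupervised.py | check_segmentation
-- ===== SOURCE A (Python) =====
-- def check_segmentation(sequence):
--     prev = sequence[0]
--     n_components = 1
--     transition_after = []
--     for i in range(1, len(sequence)):
--         if (sequence[i-1] != sequence[i]):
--             # state transition detected
--             n_components += 1
--             transition_after.append(i-1)
--     return n_components, transition_after
-- ===== SOURCE B (Python) =====
-- def check_segmentation(sequence):
--     prev = sequence[0]  # IndexError on empty, like the original
--     # decompose into maximal runs of equal adjacent values
--     runs = []
--     n = len(sequence)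
--     i = 0
--     while i < n:
--         j = i + 1
--         while j < n and sequence[j] == sequence[i]:
--             j += 1
--         runs.append(j - i)
--         i = j
--     # transition indices = running cumulative sums of all runs but the last, minus 1
--     transition_after = []
--     total = 0
--     for L in runs[:-1]:
--         total += L
--         transition_after.append(total - 1)
--     return len(runs), transition_after
-- ===== Notes on version B (the rewrite author's own statement) =====
-- stated objective: alternative
-- what changed: B decomposes the sequence into maximal runs of equal values (recursive run-length decomposition) and derives the transition indices as cumulative sums of all run lengths but the last, instead of A's single indexed scan over adjacent pairs.
import Mathlib
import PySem

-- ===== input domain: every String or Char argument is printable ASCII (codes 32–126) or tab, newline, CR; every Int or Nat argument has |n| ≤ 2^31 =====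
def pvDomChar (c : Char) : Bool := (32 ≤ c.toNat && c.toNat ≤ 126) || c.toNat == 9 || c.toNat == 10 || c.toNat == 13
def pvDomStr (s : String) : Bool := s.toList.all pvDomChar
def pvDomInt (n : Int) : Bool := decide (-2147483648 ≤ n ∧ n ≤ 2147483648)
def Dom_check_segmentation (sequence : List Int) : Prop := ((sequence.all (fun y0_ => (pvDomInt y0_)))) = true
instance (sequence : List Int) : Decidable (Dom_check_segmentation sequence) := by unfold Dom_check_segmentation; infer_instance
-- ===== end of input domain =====

-- B changes the decomposition: recursive run-length decomposition + cumulative sums,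
-- instead of A's indexed scan over adjacent pairs; same O(n) cost (objective: alternative).


-- ===== PORT A =====
def check_segmentation (sequence : List Int) : Int × List Int :=
  (PySem.List.pyRange 1 (sequence.length : Int) 1).foldl
    (fun (st : Int × List Int) i =>
      if PySem.List.pyGetD sequence (i - 1) 0 ≠ PySem.List.pyGetD sequence i 0
      then (st.1 + 1, st.2 ++ [i - 1])
      else st)
    (1, [])

-- ===== PORT B =====
-- _count_leading(v, seq): length of the maximal all-equal-to-v prefix of seq
def countLeading (v : Int) : List Int → Nat
  | [] => 0
  | y :: t => if y = v then 1 + countLeading v t else 0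

theorem countLeading_le (v : Int) (t : List Int) : countLeading v t ≤ t.length := by
  induction t with
  | nil => simp [countLeading]
  | cons y t ih =>
    simp only [countLeading]
    split
    · simp
      omega
    · simp

-- _run_lengths(seq)
def runLengths : List Int → List Int
  | [] => []
  | x :: t =>
    let k := 1 + countLeading x t
    (k : Int) :: runLengths ((x :: t).drop k)
termination_by l => l.length
decreasing_by
  have := countLeading_le x t
  simp [List.length_drop]

def check_segmentation_alt (sequence : List Int) : Int × List Int :=
  match sequence with
  | [] => (1, [])   -- Python raises IndexError here (prev = sequence[0]); excluded by Pre_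
  | _ :: _ =>
    let runs := runLengths sequence
    let r := runs.dropLast.foldl
      (fun (st : Int × List Int) L => (st.1 + L, st.2 ++ [st.1 + L - 1])) (0, [])
    ((runs.length : Int), r.2)

-- ===== PRECONDITION & SPEC =====
-- A raises IndexError on the empty list ('prev = sequence[0]'); that input is excluded.
def Pre_check_segmentation (sequence : List Int) : Prop := sequence ≠ []
instance (sequence : List Int) : Decidable (Pre_check_segmentation sequence) := by
  unfold Pre_check_segmentation; infer_instance

def pvWitness_check_segmentation : List Int := [1, 1, 2, 2, 2, 3]

def Spec_check_segmentation (sequence : List Int) (out : Int × List Int) : Prop := out = check_segmentation_alt sequence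
instance (sequence : List Int) (out : Int × List Int) : Decidable (Spec_check_segmentation sequence out) := by unfold Spec_check_segmentation; infer_instance

-- ===== CLAIM (what is proved, stated in full; the proofs are below) =====
def Claim_equal_check_segmentation : Prop := ∀ (sequence : List Int), Dom_check_segmentation sequence → Pre_check_segmentation sequence → Spec_check_segmentation sequence (check_segmentation sequence)

-- ===== LEMMAS AND PROOFS =====

theorem runLengths_nil : runLengths [] = [] := by rw [runLengths.eq_def]

theorem runLengths_cons (x : Int) (t : List Int) :
    runLengths (x :: t)
      = ((1 + countLeading x t : Nat) : Int) :: runLengths (t.drop (countLeading x t)) := by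
  rw [runLengths.eq_def]
  simp only [Nat.add_comm 1 (countLeading x t), List.drop_succ_cons]

-- structural form of A's loop result (the transition list only)
def walk (prev : Int) (p : Int) : List Int → List Int
  | [] => []
  | y :: t => if prev = y then walk y (p + 1) t else p :: walk y (p + 1) t

-- running cumulative sums, each minus one
def cum (p : Int) : List Int → List Int
  | [] => []
  | n :: rest => (p + n - 1) :: cum (p + n) rest

theorem foldl_cum (l : List Int) (p : Int) (acc : List Int) :
    (l.foldl (fun (st : Int × List Int) L => (st.1 + L, st.2 ++ [st.1 + L - 1])) (p, acc))
      = (p + l.sum, acc ++ cum p l) := by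
  induction l generalizing p acc with
  | nil => simp [cum]
  | cons n rest ih => simp [List.foldl_cons, ih, cum]; ring

theorem cum_shift (R : List Int) (p a : Int) :
    cum (p + 1) ((a :: R).dropLast) = cum p (((a + 1) :: R).dropLast) := by
  cases R with
  | nil => simp [cum]
  | cons r rs =>
    simp only [List.dropLast_cons₂, cum]
    rw [show p + 1 + a = p + (a + 1) from by ring]

-- key bridge: A's structural walk over t (after head x) is B's cumulative-sum view of the runs
theorem walk_eq_cum : ∀ (t : List Int) (x p : Int),
    walk x p t = cum p ((runLengths (x :: t)).dropLast)
      ∧ (runLengths (x :: t)).length = (walk x p t).length + 1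
  | [], x, p => by
      simp [walk, runLengths_cons, countLeading, runLengths_nil, cum]
  | y :: t', x, p => by
      by_cases hxy : x = y
      · subst hxy
        obtain ⟨ihw, ihl⟩ := walk_eq_cum t' x (p + 1)
        have hc : countLeading x (x :: t') = 1 + countLeading x t' := by
          simp [countLeading]
        have h1 : runLengths (x :: x :: t')
            = ((1 + (1 + countLeading x t') : Nat) : Int)
                :: runLengths (t'.drop (countLeading x t')) := by
          rw [runLengths_cons, hc, Nat.add_comm 1 (countLeading x t'), List.drop_succ_cons]
        have h2 := runLengths_cons x t'
        have hwalk : walk x p (x :: t') = walk x (p + 1) t' := by simp [walk]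
        constructor
        · rw [hwalk, ihw, h1, h2]
          have : ((1 + (1 + countLeading x t') : Nat) : Int)
              = ((1 + countLeading x t' : Nat) : Int) + 1 := by push_cast; ring
          rw [this, cum_shift]
        · rw [hwalk, h1]
          rw [h2] at ihl
          simp at ihl ⊢
          omega
      · obtain ⟨ihw, ihl⟩ := walk_eq_cum t' y (p + 1)
        have hyx : ¬ y = x := fun h => hxy h.symm
        have hc0 : countLeading x (y :: t') = 0 := by simp [countLeading, hyx]
        have h1 : runLengths (x :: y :: t') = (1 : Int) :: runLengths (y :: t') := by
          rw [runLengths_cons, hc0]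
          simp
        have hne : runLengths (y :: t') ≠ [] := by rw [runLengths_cons]; simp
        have hwalk : walk x p (y :: t') = p :: walk y (p + 1) t' := by simp [walk, hxy]
        constructor
        · rw [hwalk, h1, List.dropLast_cons_of_ne_nil hne]
          simp only [cum]
          rw [show p + 1 - 1 = p from by ring, ihw]
        · rw [hwalk, h1]
          simp at ihl ⊢
          omega

-- A's fold over range(a+1, len(seq)) computes walk over the corresponding suffix
theorem A_fold (seq : List Int) (k : Nat) : ∀ (a : Nat) (st : Int × List Int),
    seq.length = a + 1 + k →
    (PySem.List.pyRange ((a : Int) + 1) (seq.length : Int) 1).foldl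
      (fun (st : Int × List Int) i =>
        if PySem.List.pyGetD seq (i - 1) 0 ≠ PySem.List.pyGetD seq i 0
        then (st.1 + 1, st.2 ++ [i - 1])
        else st) st
    = (st.1 + ((walk (seq.getD a 0) (a : Int) (seq.drop (a + 1))).length : Int),
       st.2 ++ walk (seq.getD a 0) (a : Int) (seq.drop (a + 1))) := by
  induction k with
  | zero =>
    intro a st h
    have hnil : seq.drop (a + 1) = [] := List.drop_eq_nil_of_le (by omega)
    rw [PySem.List.pyRange_one_eq_nil (by omega), hnil]
    simp [walk]
  | succ k ih =>
    intro a st h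
    have hb2 : a + 1 < seq.length := by omega
    have hlt : (a : Int) + 1 < (seq.length : Int) := by omega
    rw [PySem.List.pyRange_one_cons hlt, List.foldl_cons]
    have e1 : PySem.List.pyGetD seq (((a : Int) + 1) - 1) 0 = seq.getD a 0 := by
      rw [show ((a : Int) + 1) - 1 = ((a : Nat) : Int) from by ring, PySem.List.pyGetD_natCast]
    have e2 : PySem.List.pyGetD seq ((a : Int) + 1) 0 = seq.getD (a + 1) 0 := by
      rw [show ((a : Int) + 1) = (((a + 1 : Nat)) : Int) from by push_cast; ring,
        PySem.List.pyGetD_natCast]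
    have hd : seq.drop (a + 1) = seq.getD (a + 1) 0 :: seq.drop (a + 1 + 1) := by
      rw [List.drop_eq_getElem_cons hb2, List.getD_eq_getElem _ _ hb2]
    have ihcast : ((a + 1 : Nat) : Int) = (a : Int) + 1 := by push_cast; ring
    by_cases hcond : seq.getD a 0 = seq.getD (a + 1) 0
    · rw [if_neg (by rw [e1, e2]; exact not_not_intro hcond)]
      have := ih (a + 1) st (by omega)
      rw [ihcast] at this
      rw [this, hd, walk, if_pos hcond]
    · rw [if_pos (by rw [e1, e2]; exact hcond)]
      have := ih (a + 1) (st.1 + 1, st.2 ++ [(a : Int) + 1 - 1]) (by omega)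
      rw [ihcast] at this
      rw [this, hd, walk, if_neg hcond]
      rw [show (a : Int) + 1 - 1 = (a : Int) from by ring]
      simp
      omega

-- ===== VERDICT (by name: the statement is the Claim_ definition above) =====
theorem check_segmentation_spec : Claim_equal_check_segmentation := by
  intro seq _hdom hpre
  unfold Spec_check_segmentation
  cases seq with
  | nil => exact absurd rfl hpre
  | cons x t =>
    have hA := A_fold (x :: t) t.length 0 (1, []) (by simp; omega)
    norm_num at hA
    unfold check_segmentation
    simp only [ne_eq, ite_not, List.length_cons, Nat.cast_add, Nat.cast_one]
    rw [hA]
    obtain ⟨hw, hl⟩ := walk_eq_cum t x 0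
    show _ = (((runLengths (x :: t)).length : Int),
      ((runLengths (x :: t)).dropLast.foldl
        (fun (st : Int × List Int) L => (st.1 + L, st.2 ++ [st.1 + L - 1])) (0, [])).2)
    rw [foldl_cum]
    simp only [List.nil_append]
    refine Prod.ext ?_ ?_
    · simp only []
      rw [hl]
      push_cast
      ring
    · simpa using hw
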